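-- pv_equiv track=rewrite | github.com/neophrythe/nexus-ai | nexus/input/human_like.py | _get_adjacent_keys
-- ===== SOURCE A (Python) =====
-- from typing import List, Tuple, Optional
--
-- def _get_adjacent_keys(char: str) -> List[str]:
--     """Get keys adjacent to the given character on keyboard"""
--
--     keyboard_layout = [
--         "1234567890",
--         "qwertyuiop",
--         "asdfghjkl",
--         "zxcvbnm"
--     ]
--
--     adjacent = []
--
--     for row_idx, row in enumerate(keyboard_layout):
--         if char.lower() in row:
--             col_idx = row.index(char.lower())
--
--             # Same row adjacents
--             if col_idx > 0:
--                 adjacent.append(row[col_idx - 1])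
--             if col_idx < len(row) - 1:
--                 adjacent.append(row[col_idx + 1])
--
--             # Adjacent rows
--             if row_idx > 0:
--                 prev_row = keyboard_layout[row_idx - 1]
--                 if col_idx < len(prev_row):
--                     adjacent.append(prev_row[col_idx])
--
--             if row_idx < len(keyboard_layout) - 1:
--                 next_row = keyboard_layout[row_idx + 1]
--                 if col_idx < len(next_row):
--                     adjacent.append(next_row[col_idx])
--
--             break
--
--     return adjacent
-- ===== SOURCE B (Python) =====
-- from typing import List
--
-- # Precomputed adjacency table for the fixed QWERTY layout: neighbor order is
-- # left, right, up, down (matching reading order of the keyboard).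
-- _ADJACENT = {
--     '1': ['2', 'q'], '2': ['1', '3', 'w'], '3': ['2', '4', 'e'],
--     '4': ['3', '5', 'r'], '5': ['4', '6', 't'], '6': ['5', '7', 'y'],
--     '7': ['6', '8', 'u'], '8': ['7', '9', 'i'], '9': ['8', '0', 'o'],
--     '0': ['9', 'p'],
--     'q': ['w', '1', 'a'], 'w': ['q', 'e', '2', 's'], 'e': ['w', 'r', '3', 'd'],
--     'r': ['e', 't', '4', 'f'], 't': ['r', 'y', '5', 'g'], 'y': ['t', 'u', '6', 'h'],
--     'u': ['y', 'i', '7', 'j'], 'i': ['u', 'o', '8', 'k'], 'o': ['i', 'p', '9', 'l'],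
--     'p': ['o', '0'],
--     'a': ['s', 'q', 'z'], 's': ['a', 'd', 'w', 'x'], 'd': ['s', 'f', 'e', 'c'],
--     'f': ['d', 'g', 'r', 'v'], 'g': ['f', 'h', 't', 'b'], 'h': ['g', 'j', 'y', 'n'],
--     'j': ['h', 'k', 'u', 'm'], 'k': ['j', 'l', 'i'], 'l': ['k', 'o'],
--     'z': ['x', 'a'], 'x': ['z', 'c', 's'], 'c': ['x', 'v', 'd'],
--     'v': ['c', 'b', 'f'], 'b': ['v', 'n', 'g'], 'n': ['b', 'm', 'h'],
--     'm': ['n', 'j'],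
-- }
--
--
-- def _get_adjacent_keys(char: str) -> List[str]:
--     """Get keys adjacent to the given character on keyboard"""
--     return _ADJACENT.get(char.lower(), [])
-- ===== Notes on version B (the rewrite author's own statement) =====
-- stated objective: simpler
-- what changed: B replaces A's runtime row scan, index search and per-direction branching over the layout by a single lookup of the lowercased input in a precomputed literal adjacency table.
-- intended difference: On inputs whose lowercase form is not a single character yet occurs contiguously in a layout row (the empty string, or fragments such as 'qw'), A's substring membership test against the row accidentally matches and A returns the neighbors of the match position, while B returns [], the intended result for a function that takes one character. — e.g. on _get_adjacent_keys(""): A returns ["2", "q"], B returns []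
import Mathlib
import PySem

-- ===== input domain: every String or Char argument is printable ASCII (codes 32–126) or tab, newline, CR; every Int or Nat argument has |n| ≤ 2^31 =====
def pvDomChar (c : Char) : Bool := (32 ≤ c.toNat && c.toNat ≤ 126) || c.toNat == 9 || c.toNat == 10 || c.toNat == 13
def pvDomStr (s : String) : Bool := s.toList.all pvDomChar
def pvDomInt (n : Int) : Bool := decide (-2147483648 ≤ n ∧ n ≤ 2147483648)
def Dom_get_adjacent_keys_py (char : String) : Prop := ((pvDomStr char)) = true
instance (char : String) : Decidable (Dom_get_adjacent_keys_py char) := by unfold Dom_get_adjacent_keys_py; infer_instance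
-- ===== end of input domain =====

set_option maxRecDepth 2000
set_option maxHeartbeats 4000000


-- B replaces A's runtime row scan and per-direction branching by a single lookup of
-- char.lower() in a precomputed literal adjacency table (objective: simpler).

-- ===== PORT A =====
-- the fixed keyboard layout literal of A
def pvLayout : List String := ["1234567890", "qwertyuiop", "asdfghjkl", "zxcvbnm"]

-- Python's s[i] producing a 1-character string; every use below is guarded in range,
-- where `.getD`'s default is never taken, so this is exact there
def pvIdx (s : String) (i : Int) : String :=
  match PySem.Str.pyGet? s i with
  | some ch => String.ofList [ch]
  | none => ""

-- the body of A's `if char.lower() in row:` branch (the four append groups, in order)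
def pvABranch (rowIdx : Int) (row : String) (colIdx : Int) : List String :=
  let adjacent : List String := []
  let adjacent := if 0 < colIdx then adjacent ++ [pvIdx row (colIdx - 1)] else adjacent
  let adjacent := if colIdx < PySem.Str.len row - 1 then adjacent ++ [pvIdx row (colIdx + 1)] else adjacent
  let adjacent :=
    if 0 < rowIdx then
      let prevRow := ((PySem.List.pyGet? pvLayout (rowIdx - 1)).getD "")
      if colIdx < PySem.Str.len prevRow then adjacent ++ [pvIdx prevRow colIdx] else adjacent
    else adjacent
  let adjacent :=
    if rowIdx < (pvLayout.length : Int) - 1 then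
      let nextRow := ((PySem.List.pyGet? pvLayout (rowIdx + 1)).getD "")
      if colIdx < PySem.Str.len nextRow then adjacent ++ [pvIdx nextRow colIdx] else adjacent
    else adjacent
  adjacent

-- A's `for row_idx, row in enumerate(...)` loop with its `break`
def pvAGo (c : String) : List (Int × String) → List String
  | [] => []
  | (rowIdx, row) :: rest =>
      if PySem.Str.isIn c row then pvABranch rowIdx row (PySem.Str.find row c)
      else pvAGo c rest

def get_adjacent_keys_py (char : String) : List String :=
  pvAGo (PySem.Str.lower char) (PySem.List.enumerate pvLayout)

-- ===== PORT B =====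
-- B's literal adjacency table _ADJACENT (a Python dict literal; keys are distinct)
def pvAdj : PySem.Dict String (List String) :=
  PySem.Dict.mk
  [("1", ["2", "q"]),
   ("2", ["1", "3", "w"]),
   ("3", ["2", "4", "e"]),
   ("4", ["3", "5", "r"]),
   ("5", ["4", "6", "t"]),
   ("6", ["5", "7", "y"]),
   ("7", ["6", "8", "u"]),
   ("8", ["7", "9", "i"]),
   ("9", ["8", "0", "o"]),
   ("0", ["9", "p"]),
   ("q", ["w", "1", "a"]),
   ("w", ["q", "e", "2", "s"]),
   ("e", ["w", "r", "3", "d"]),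
   ("r", ["e", "t", "4", "f"]),
   ("t", ["r", "y", "5", "g"]),
   ("y", ["t", "u", "6", "h"]),
   ("u", ["y", "i", "7", "j"]),
   ("i", ["u", "o", "8", "k"]),
   ("o", ["i", "p", "9", "l"]),
   ("p", ["o", "0"]),
   ("a", ["s", "q", "z"]),
   ("s", ["a", "d", "w", "x"]),
   ("d", ["s", "f", "e", "c"]),
   ("f", ["d", "g", "r", "v"]),
   ("g", ["f", "h", "t", "b"]),
   ("h", ["g", "j", "y", "n"]),
   ("j", ["h", "k", "u", "m"]),
   ("k", ["j", "l", "i"]),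
   ("l", ["k", "o"]),
   ("z", ["x", "a"]),
   ("x", ["z", "c", "s"]),
   ("c", ["x", "v", "d"]),
   ("v", ["c", "b", "f"]),
   ("b", ["v", "n", "g"]),
   ("n", ["b", "m", "h"]),
   ("m", ["n", "j"])]

-- B: `_ADJACENT.get(char.lower(), [])`
def get_adjacent_keys_py_alt (char : String) : List String :=
  PySem.Dict.getD pvAdj (PySem.Str.lower char) []

-- ===== PRECONDITION & SPEC =====
-- On inputs whose lowercase form is not a single character yet occurs contiguously in a
-- layout row (the empty string, or fragments like "qw"), A's substring membership test
-- against the row accidentally matches and A returns the neighbours of the match position,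
-- while B returns [], the intended result for a function that takes one character.
def D_get_adjacent_keys_py (char : String) : Prop :=
  PySem.Str.len (PySem.Str.lower char) ≠ 1 ∧
  (PySem.Str.isIn (PySem.Str.lower char) "1234567890" = true ∨
   PySem.Str.isIn (PySem.Str.lower char) "qwertyuiop" = true ∨
   PySem.Str.isIn (PySem.Str.lower char) "asdfghjkl" = true ∨
   PySem.Str.isIn (PySem.Str.lower char) "zxcvbnm" = true)
instance (char : String) : Decidable (D_get_adjacent_keys_py char) := by
  unfold D_get_adjacent_keys_py; infer_instance

def Spec_get_adjacent_keys_py (char : String) (out : List String) : Prop :=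
  ¬ D_get_adjacent_keys_py char → out = get_adjacent_keys_py_alt char
instance (char : String) (out : List String) : Decidable (Spec_get_adjacent_keys_py char out) := by
  unfold Spec_get_adjacent_keys_py; infer_instance

def pvDiffWitness_get_adjacent_keys_py : String := ""
def pvDiffWitnessOut_get_adjacent_keys_py : (List String) × (List String) := (["2", "q"], [])

-- ===== CLAIM (what is proved, stated in full; the proofs are below) =====
def Claim_unchanged_get_adjacent_keys_py : Prop := ∀ (char : String), Dom_get_adjacent_keys_py char → Spec_get_adjacent_keys_py char (get_adjacent_keys_py char)
def Claim_changed_get_adjacent_keys_py : Prop := Dom_get_adjacent_keys_py (pvDiffWitness_get_adjacent_keys_py) ∧ D_get_adjacent_keys_py (pvDiffWitness_get_adjacent_keys_py) ∧ get_adjacent_keys_py (pvDiffWitness_get_adjacent_keys_py) = pvDiffWitnessOut_get_adjacent_keys_py.1 ∧ get_adjacent_keys_py_alt (pvDiffWitness_get_adjacent_keys_py) = pvDiffWitnessOut_get_adjacent_keys_py.2 ∧ pvDiffWitnessOut_get_adjacent_keys_py.1 ≠ pvDiffWitnessOut_get_adjacent_keys_py.2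
def Claim_exact_get_adjacent_keys_py : Prop := ∀ (char : String), Dom_get_adjacent_keys_py char → D_get_adjacent_keys_py char → get_adjacent_keys_py char ≠ get_adjacent_keys_py_alt char

-- ===== LEMMAS AND PROOFS =====

-- the keys of pvAdj, as strings and as the underlying characters
def pvKeys : List String := ["1", "2", "3", "4", "5", "6", "7", "8", "9", "0", "q", "w", "e", "r", "t", "y", "u", "i", "o", "p", "a", "s", "d", "f", "g", "h", "j", "k", "l", "z", "x", "c", "v", "b", "n", "m"]
def pvKeyChars : List Char := ['1', '2', '3', '4', '5', '6', '7', '8', '9', '0', 'q', 'w', 'e', 'r', 't', 'y', 'u', 'i', 'o', 'p', 'a', 's', 'd', 'f', 'g', 'h', 'j', 'k', 'l', 'z', 'x', 'c', 'v', 'b', 'n', 'm']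

theorem pv_enum_eq : PySem.List.enumerate pvLayout =
    [((0 : Int), "1234567890"), (1, "qwertyuiop"), (2, "asdfghjkl"), (3, "zxcvbnm")] := rfl

-- every key of pvAdj is a one-character string
theorem pv_keys_len : ∀ c ∈ pvKeys, PySem.Str.len c = 1 := by
  intro c hc; fin_cases hc <;> decide

-- the character of a key of pvAdj is a layout character
theorem pv_keys_char : ∀ c ∈ pvKeys, ∀ ch : Char, ch ∈ c.toList → ch ∈ pvKeyChars := by
  intro c hc ch hch; fin_cases hc <;> fin_cases hch <;> decide

-- B's table lookup misses for any string that is not one of the 36 keys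
theorem pv_getD_nil (c : String) (h : c ∉ pvKeys) : PySem.Dict.getD pvAdj c [] = [] := by
  simp only [pvKeys, List.mem_cons, List.not_mem_nil, or_false, not_or] at h
  obtain ⟨h1, h2, h3, h4, h5, h6, h7, h8, h9, h10, h11, h12, h13, h14, h15, h16, h17, h18, h19, h20, h21, h22, h23, h24, h25, h26, h27, h28, h29, h30, h31, h32, h33, h34, h35, h36⟩ := h
  simp [pvAdj, PySem.Dict.getD, PySem.Dict.get?, Ne.symm h1, Ne.symm h2, Ne.symm h3, Ne.symm h4, Ne.symm h5, Ne.symm h6, Ne.symm h7, Ne.symm h8, Ne.symm h9, Ne.symm h10, Ne.symm h11, Ne.symm h12, Ne.symm h13, Ne.symm h14, Ne.symm h15, Ne.symm h16, Ne.symm h17, Ne.symm h18, Ne.symm h19, Ne.symm h20, Ne.symm h21, Ne.symm h22, Ne.symm h23, Ne.symm h24, Ne.symm h25, Ne.symm h26, Ne.symm h27, Ne.symm h28, Ne.symm h29, Ne.symm h30, Ne.symm h31, Ne.symm h32, Ne.symm h33, Ne.symm h34, Ne.symm h35, Ne.symm h36]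

-- A's scan returns [] when no row contains c
theorem pv_scan_nil (c : String)
    (h1 : PySem.Str.isIn c "1234567890" = false) (h2 : PySem.Str.isIn c "qwertyuiop" = false)
    (h3 : PySem.Str.isIn c "asdfghjkl" = false) (h4 : PySem.Str.isIn c "zxcvbnm" = false) :
    pvAGo c (PySem.List.enumerate pvLayout) = [] := by
  rw [pv_enum_eq]
  simp only [PySem.Str.isIn_eq] at h1 h2 h3 h4
  simp [pvAGo]
  simp_all

-- a one-character string whose character is not in a row is not a substring of it
theorem pv_notrow (row c : String) (ch : Char) (hl : c.toList = [ch])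
    (hm : ch ∉ row.toList) : PySem.Str.isIn c row = false := by
  cases hb : PySem.Str.isIn c row
  · rfl
  · exact absurd (((PySem.Str.isIn_iff_infix c row).mp hb).subset
      (hl ▸ List.mem_singleton_self ch)) hm

-- A's branch body is nonempty whenever a right neighbour exists
theorem pv_branch_ne (r : Int) (row : String) (k : Int)
    (h : k < PySem.Str.len row - 1) : pvABranch r row k ≠ [] := by
  unfold pvABranch
  intro hc
  split_ifs at hc
  all_goals try simp_all
  all_goals split_ifs at hc <;> simp_all

-- where c matches and c is not one character long, the match column has a right neighbour
theorem pv_find_lt (row c : String) (hin : PySem.Str.isIn c row = true)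
    (hlen : PySem.Str.len c ≠ 1) (hrow : (2 : Int) ≤ PySem.Str.len row) :
    PySem.Str.find row c < PySem.Str.len row - 1 := by
  have heq : PySem.Str.find row c = PySem.Chars.find row.toList c.toList := by simp
  have hlrow : PySem.Str.len row = (row.toList.length : Int) := by simp
  by_cases h0 : c.toList = []
  · rw [heq, h0, PySem.Chars.find_nil]; omega
  · have h2 : 2 ≤ c.toList.length := by
      have hlc : PySem.Str.len c = (c.toList.length : Int) := by simp
      have : c.toList.length ≠ 0 := fun hz => h0 (List.length_eq_zero_iff.mp hz)
      omega
    have hinf : c.toList <:+: row.toList := (PySem.Str.isIn_iff_infix c row).mp hin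
    have hk0 : 0 ≤ PySem.Chars.find row.toList c.toList := by
      simpa using (PySem.Str.find_nonneg_iff row c).mpr hinf
    have hle := (PySem.Chars.find_spec (s := row.toList) (sub := c.toList) hk0).1.length_le
    rw [List.length_drop] at hle
    rw [heq, hlrow]
    omega

-- the core equality: outside the changed region the scan agrees with the table lookup
theorem pv_main (c : String)
    (hnd : ¬ (PySem.Str.len c ≠ 1 ∧
      (PySem.Str.isIn c "1234567890" = true ∨ PySem.Str.isIn c "qwertyuiop" = true ∨
       PySem.Str.isIn c "asdfghjkl" = true ∨ PySem.Str.isIn c "zxcvbnm" = true))) :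
    pvAGo c (PySem.List.enumerate pvLayout) = PySem.Dict.getD pvAdj c [] := by
  by_cases hlen : PySem.Str.len c = 1
  · have hlc : c.toList.length = 1 := by
      have : PySem.Str.len c = (c.toList.length : Int) := by simp
      omega
    obtain ⟨ch, hlist⟩ := List.length_eq_one_iff.mp hlc
    have hceq : c = String.ofList [ch] := by rw [← hlist, String.ofList_toList]
    subst hceq
    by_cases hmem : ch ∈ pvKeyChars
    · fin_cases hmem <;> decide
    · have hr1 : (∀ x ∈ ['1','2','3','4','5','6','7','8','9','0'], x ∈ pvKeyChars) := by
        intro x hx; fin_cases hx <;> decide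
      have hr2 : (∀ x ∈ ['q','w','e','r','t','y','u','i','o','p'], x ∈ pvKeyChars) := by
        intro x hx; fin_cases hx <;> decide
      have hr3 : (∀ x ∈ ['a','s','d','f','g','h','j','k','l'], x ∈ pvKeyChars) := by
        intro x hx; fin_cases hx <;> decide
      have hr4 : (∀ x ∈ ['z','x','c','v','b','n','m'], x ∈ pvKeyChars) := by
        intro x hx; fin_cases hx <;> decide
      rw [pv_scan_nil _ (pv_notrow _ _ ch hlist (fun hm => hmem (hr1 ch (by simpa using hm))))
        (pv_notrow _ _ ch hlist (fun hm => hmem (hr2 ch (by simpa using hm))))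
        (pv_notrow _ _ ch hlist (fun hm => hmem (hr3 ch (by simpa using hm))))
        (pv_notrow _ _ ch hlist (fun hm => hmem (hr4 ch (by simpa using hm))))]
      exact (pv_getD_nil _ (fun hk => hmem (pv_keys_char _ hk ch
        (by rw [hlist]; exact List.mem_singleton_self ch)))).symm
  · have hnor := fun hd => hnd ⟨hlen, hd⟩
    have h1 : PySem.Str.isIn c "1234567890" = false := by
      cases hb : PySem.Str.isIn c "1234567890"
      · rfl
      · exact absurd (Or.inl hb) hnor
    have h2 : PySem.Str.isIn c "qwertyuiop" = false := by
      cases hb : PySem.Str.isIn c "qwertyuiop"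
      · rfl
      · exact absurd (Or.inr (Or.inl hb)) hnor
    have h3 : PySem.Str.isIn c "asdfghjkl" = false := by
      cases hb : PySem.Str.isIn c "asdfghjkl"
      · rfl
      · exact absurd (Or.inr (Or.inr (Or.inl hb))) hnor
    have h4 : PySem.Str.isIn c "zxcvbnm" = false := by
      cases hb : PySem.Str.isIn c "zxcvbnm"
      · rfl
      · exact absurd (Or.inr (Or.inr (Or.inr hb))) hnor
    rw [pv_scan_nil _ h1 h2 h3 h4]
    exact (pv_getD_nil _ (fun hk => hlen (pv_keys_len _ hk))).symm

-- inside the changed region A's scan result is never [] while B's lookup is []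
theorem pv_diff (c : String) (hlen : PySem.Str.len c ≠ 1)
    (hdis : PySem.Str.isIn c "1234567890" = true ∨ PySem.Str.isIn c "qwertyuiop" = true ∨
      PySem.Str.isIn c "asdfghjkl" = true ∨ PySem.Str.isIn c "zxcvbnm" = true) :
    pvAGo c (PySem.List.enumerate pvLayout) ≠ PySem.Dict.getD pvAdj c [] := by
  rw [pv_getD_nil _ (fun hk => hlen (pv_keys_len _ hk)), pv_enum_eq]
  by_cases h1 : PySem.Str.isIn c "1234567890" = true
  · simp only [pvAGo, h1, if_true]
    exact pv_branch_ne _ _ _ (pv_find_lt _ _ h1 hlen (by decide))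
  · by_cases h2 : PySem.Str.isIn c "qwertyuiop" = true
    · simp only [pvAGo, h1, h2, if_true, if_false, Bool.false_eq_true]
      exact pv_branch_ne _ _ _ (pv_find_lt _ _ h2 hlen (by decide))
    · by_cases h3 : PySem.Str.isIn c "asdfghjkl" = true
      · simp only [pvAGo, h1, h2, h3, if_true, if_false, Bool.false_eq_true]
        exact pv_branch_ne _ _ _ (pv_find_lt _ _ h3 hlen (by decide))
      · have h4 : PySem.Str.isIn c "zxcvbnm" = true := by
          rcases hdis with h | h | h | h <;> simp_all
        simp only [pvAGo, h1, h2, h3, h4, if_true, if_false, Bool.false_eq_true]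
        exact pv_branch_ne _ _ _ (pv_find_lt _ _ h4 hlen (by decide))

-- ===== VERDICT (by name: the statements are the Claim_ definitions above) =====
theorem get_adjacent_keys_py_spec : Claim_unchanged_get_adjacent_keys_py := by
  intro char _ hnD
  unfold D_get_adjacent_keys_py at hnD
  unfold get_adjacent_keys_py get_adjacent_keys_py_alt
  exact pv_main (PySem.Str.lower char) hnD

theorem get_adjacent_keys_py_changed : Claim_changed_get_adjacent_keys_py := by
  unfold Claim_changed_get_adjacent_keys_py; decide

theorem get_adjacent_keys_py_tight : Claim_exact_get_adjacent_keys_py := by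
  intro char _ hD
  obtain ⟨hlen, hdis⟩ := hD
  unfold get_adjacent_keys_py get_adjacent_keys_py_alt
  exact pv_diff (PySem.Str.lower char) hlen hdis
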